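-- pv_equiv track=rewrite | github.com/Jarabi/fundamental-coding-interview-prep | 02-simple-looping-with-python/12-outward_pairs.py | solution
-- ===== SOURCE A (Python) =====
-- def solution(numbers):
--     n = len(numbers)
--
--     mid = n // 2
--     left = mid - 1
--     right = mid
--     pairs = []
--
--     if n % 2 != 0:
--         right += 1
--         pairs.append((numbers[mid], 0))
--
--     while left >= 0 and right < n:
--         pairs.append((numbers[left], numbers[right]))
--         left -= 1
--         right += 1
--
--     return pairs
-- ===== SOURCE B (Python) =====
-- def solution(numbers):
--     n = len(numbers)
--     mid = n // 2
--     stack = []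
--     pairs = []
--     for i, x in enumerate(numbers):
--         if i < mid:
--             stack.append(x)
--         elif i == mid and n % 2:
--             pairs.append((x, 0))
--         else:
--             pairs.append((stack.pop(), x))
--     return pairs
-- ===== Notes on version B (the rewrite author's own statement) =====
-- stated objective: alternative
-- what changed: Replaces the two-pointer outward walk from the middle (random access on both sides) with a single forward pass that pushes the first half onto an explicit stack and then pops it to pair against the second half as it is reached.
import Mathlib
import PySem

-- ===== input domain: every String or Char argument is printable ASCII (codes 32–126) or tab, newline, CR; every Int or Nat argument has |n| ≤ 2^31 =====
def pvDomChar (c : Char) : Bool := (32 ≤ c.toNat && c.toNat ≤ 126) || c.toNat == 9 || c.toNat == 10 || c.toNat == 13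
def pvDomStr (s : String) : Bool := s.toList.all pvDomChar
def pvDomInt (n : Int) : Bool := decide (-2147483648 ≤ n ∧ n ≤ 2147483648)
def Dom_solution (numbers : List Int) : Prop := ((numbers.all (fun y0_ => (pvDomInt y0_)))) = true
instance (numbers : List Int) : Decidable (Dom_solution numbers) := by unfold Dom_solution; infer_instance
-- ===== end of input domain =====

-- B replaces A's two-pointer outward walk with a single forward pass using an explicit stack; objective: alternative.

-- ===== PORT A =====
-- the while loop: indices stay in range while the loop runs, so numbers[i] is ported as pyGet? … |>.getD 0
def solutionLoop (numbers : List Int) (left right : Int) (pairs : List (Int × Int)) :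
    List (Int × Int) :=
  if h : 0 ≤ left ∧ right < (numbers.length : Int) then
    solutionLoop numbers (left - 1) (right + 1)
      (pairs ++ [((PySem.List.pyGet? numbers left).getD 0, (PySem.List.pyGet? numbers right).getD 0)])
  else pairs
termination_by ((numbers.length : Int) - right).toNat
decreasing_by omega

def solution (numbers : List Int) : List (Int × Int) :=
  let n : Int := numbers.length
  let mid := PySem.Int.floordiv n 2
  let left := mid - 1
  let right := mid
  let pairs : List (Int × Int) := []
  if PySem.Int.mod n 2 ≠ 0 then
    solutionLoop numbers left (right + 1)
      (pairs ++ [((PySem.List.pyGet? numbers mid).getD 0, 0)])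
  else
    solutionLoop numbers left right pairs

-- ===== PORT B =====
-- loop body of Source B's single for-loop; stack.pop() never fires on an empty stack, so the
-- IndexError-free pop is ported as pop? … |>.getD
def altStep (n mid : Int) (st : List Int × List (Int × Int)) (ix : Int × Int) :
    List Int × List (Int × Int) :=
  if ix.1 < mid then (st.1 ++ [ix.2], st.2)
  else if ix.1 = mid ∧ PySem.Int.mod n 2 ≠ 0 then (st.1, st.2 ++ [(ix.2, 0)])
  else
    let p := (PySem.List.pop? st.1 (-1)).getD (0, [])
    (p.2, st.2 ++ [(p.1, ix.2)])

def solution_alt (numbers : List Int) : List (Int × Int) :=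
  let n : Int := numbers.length
  let mid := PySem.Int.floordiv n 2
  ((PySem.List.enumerate numbers 0).foldl (altStep n mid) ([], [])).2

-- ===== PRECONDITION & SPEC =====
def Spec_solution (numbers : List Int) (out : List (Int × Int)) : Prop := out = solution_alt numbers
instance (numbers : List Int) (out : List (Int × Int)) : Decidable (Spec_solution numbers out) := by unfold Spec_solution; infer_instance

-- ===== CLAIM (what is proved, stated in full; the proofs are below) =====
def Claim_equal_solution : Prop := ∀ (numbers : List Int), Dom_solution numbers → Spec_solution numbers (solution numbers)

-- ===== LEMMAS AND PROOFS =====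
lemma solutionLoop_eq (numbers : List Int) (left right : Int) (pairs : List (Int × Int))
    (hl : left < (numbers.length : Int)) (hr : 0 ≤ right) :
    solutionLoop numbers left right pairs =
      pairs ++ ((numbers.take (left + 1).toNat).reverse).zip (numbers.drop right.toNat) := by
  fun_induction solutionLoop numbers left right pairs with
  | case1 left right pairs h ih =>
      rw [ih (by omega) (by omega)]
      have hlt : left.toNat < numbers.length := by omega
      have hrt : right.toNat < numbers.length := by omega
      have hget : PySem.List.pyGet? numbers left = some numbers[left.toNat] :=
        PySem.List.pyGet?_eq_some_getElem _ h.1 hl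
      have hgetr : PySem.List.pyGet? numbers right = some numbers[right.toNat] :=
        PySem.List.pyGet?_eq_some_getElem _ hr h.2
      have htake : (numbers.take (left + 1).toNat).reverse =
          numbers[left.toNat] :: (numbers.take left.toNat).reverse := by
        have h1 : (left + 1).toNat = left.toNat + 1 := by omega
        rw [h1, List.take_add_one, List.getElem?_eq_getElem hlt]
        simp
      have hdrop : numbers.drop right.toNat =
          numbers[right.toNat] :: numbers.drop (right + 1).toNat := by
        have h1 : (right + 1).toNat = right.toNat + 1 := by omega
        rw [h1, List.drop_eq_getElem_cons hrt]
      have hleft1 : (left - 1 + 1).toNat = left.toNat := by omega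
      rw [htake, hdrop, hleft1, hget, hgetr]
      simp [List.zip]
  | case2 left right pairs h =>
      rcases not_and_or.mp h with hneg | hbig
      · have h0 : (left + 1).toNat = 0 := by omega
        simp [h0]
      · have h0 : numbers.length ≤ right.toNat := by omega
        simp [List.drop_eq_nil_of_le h0]

-- phase 1 of B: while the index stays below mid, elements are pushed onto the stack
lemma altPhase1 (n mid : Int) (t : List Int) : ∀ (s : List Int) (pairs : List (Int × Int)) (j : Int),
    j + t.length ≤ mid →
    (PySem.List.enumerate t j).foldl (altStep n mid) (s, pairs) = (s ++ t, pairs) := by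
  induction t with
  | nil => intro s pairs j _; simp [PySem.List.enumerate_nil]
  | cons a t ih =>
      intro s pairs j hj
      rw [PySem.List.enumerate_cons, List.foldl_cons]
      have hja : (j, a).1 < mid := by simp at hj ⊢; omega
      rw [altStep, if_pos hja]
      rw [ih (s ++ [a]) pairs (j + 1) (by simp at hj ⊢; omega)]
      simp

-- phase 2 of B: past the middle, each element is paired with a popped stack element
lemma altPhase2 (n mid : Int) (t : List Int) : ∀ (s : List Int) (pairs : List (Int × Int)) (j : Int),
    s.length = t.length → mid ≤ j → (j = mid → PySem.Int.mod n 2 = 0) →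
    (PySem.List.enumerate t j).foldl (altStep n mid) (s, pairs) =
      ([], pairs ++ s.reverse.zip t) := by
  induction t with
  | nil =>
      intro s pairs j hlen _ _
      have : s = [] := List.eq_nil_of_length_eq_zero (by simpa using hlen)
      simp [this, PySem.List.enumerate_nil]
  | cons a t ih =>
      intro s pairs j hlen hj hjm
      rcases s.eq_nil_or_concat with rfl | ⟨s', b, rfl⟩
      · simp at hlen
      rw [PySem.List.enumerate_cons, List.foldl_cons]
      have h1 : ¬ ((j, a).1 < mid) := by simp; omega
      have h2 : ¬ ((j, a).1 = mid ∧ PySem.Int.mod n 2 ≠ 0) := by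
        rintro ⟨hje, hodd⟩; exact hodd (hjm hje)
      rw [altStep, if_neg h1, if_neg h2]
      have hpop : PySem.List.pop? (s' ++ [b]) (-1) = some (b, s') := PySem.List.pop?_last _ _
      simp only [List.concat_eq_append] at hlen ⊢
      simp only [hpop, Option.getD_some]
      rw [ih s' (pairs ++ [(b, a)]) (j + 1) (by simp at hlen ⊢; omega) (by omega)
        (by intro h; omega)]
      simp [List.zip]

-- ===== VERDICT (by name: the statement is the Claim_ definition above) =====
theorem solution_spec : Claim_equal_solution := by
  intro numbers _
  unfold Spec_solution solution solution_alt
  simp only [PySem.Int.floordiv, PySem.Int.mod]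
  have hm : ((numbers.length : Int)).fmod 2 = (numbers.length : Int) % 2 := by
    rw [Int.fmod_eq_emod]; simp
  have hd : ((numbers.length : Int)).fdiv 2 = (numbers.length : Int) / 2 :=
    Int.fdiv_eq_ediv_of_nonneg _ (by positivity)
  rw [hm, hd]
  have hmid : ((numbers.length : Int) / 2) = ((numbers.length / 2 : Nat) : Int) := by omega
  rw [hmid]
  have hmod' : PySem.Int.mod (numbers.length : Int) 2 = (numbers.length : Int) % 2 := by
    simp [PySem.Int.mod, Int.fmod_eq_emod]
  have hlen_take : (numbers.take (numbers.length / 2)).length = numbers.length / 2 := by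
    simp [List.length_take]; omega
  have hsplit : PySem.List.enumerate numbers 0 =
      PySem.List.enumerate (numbers.take (numbers.length / 2)) 0 ++
      PySem.List.enumerate (numbers.drop (numbers.length / 2))
        (0 + ((numbers.take (numbers.length / 2)).length : Int)) := by
    rw [← PySem.List.enumerate_append, List.take_append_drop]
  have hA1 : (PySem.List.enumerate (numbers.take (numbers.length / 2)) 0).foldl
      (altStep (numbers.length : Int) ((numbers.length / 2 : Nat) : Int)) ([], []) =
      ([] ++ numbers.take (numbers.length / 2), []) :=
    altPhase1 _ _ _ [] [] 0 (by rw [hlen_take]; omega)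
  by_cases hpar : numbers.length % 2 = 0
  · -- even length
    rw [if_neg (by omega), solutionLoop_eq numbers _ _ _ (by omega) (by omega)]
    have hA2 : (PySem.List.enumerate (numbers.drop (numbers.length / 2))
        (0 + ((numbers.take (numbers.length / 2)).length : Int))).foldl
        (altStep (numbers.length : Int) ((numbers.length / 2 : Nat) : Int))
        ([] ++ numbers.take (numbers.length / 2), []) =
        ([], [] ++ ([] ++ numbers.take (numbers.length / 2)).reverse.zip
          (numbers.drop (numbers.length / 2))) :=
      altPhase2 _ _ _ _ [] _ (by simp [hlen_take]; omega) (by rw [hlen_take]; omega)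
        (by intro _; rw [hmod']; omega)
    rw [hsplit, List.foldl_append, hA1, hA2]
    have h1 : ((numbers.length : Int) / 2 - 1 + 1).toNat = numbers.length / 2 := by omega
    have h2 : ((numbers.length : Int) / 2).toNat = numbers.length / 2 := by omega
    rw [hmid] at h1 h2
    rw [h1, h2]
    simp
  · -- odd length
    rw [if_pos (by omega), solutionLoop_eq numbers _ _ _ (by omega) (by omega)]
    have hmN : numbers.length / 2 < numbers.length := by omega
    have hdropm : numbers.drop (numbers.length / 2) =
        numbers[numbers.length / 2] :: numbers.drop (numbers.length / 2 + 1) :=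
      List.drop_eq_getElem_cons hmN
    rw [hsplit, hdropm, PySem.List.enumerate_cons, List.foldl_append, List.foldl_cons, hA1]
    have hstep : altStep (numbers.length : Int) ((numbers.length / 2 : Nat) : Int)
        ([] ++ numbers.take (numbers.length / 2), [])
        ((0 : Int) + ((numbers.take (numbers.length / 2)).length : Int),
          numbers[numbers.length / 2]) =
        ([] ++ numbers.take (numbers.length / 2), [] ++ [(numbers[numbers.length / 2], 0)]) := by
      rw [altStep, if_neg (by rw [hlen_take]; simp),
        if_pos (by refine ⟨by rw [hlen_take]; simp, by rw [hmod']; omega⟩)]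
    rw [hstep]
    have hA2 : (PySem.List.enumerate (numbers.drop (numbers.length / 2 + 1))
        ((0 : Int) + ((numbers.take (numbers.length / 2)).length : Int) + 1)).foldl
        (altStep (numbers.length : Int) ((numbers.length / 2 : Nat) : Int))
        ([] ++ numbers.take (numbers.length / 2), [] ++ [(numbers[numbers.length / 2], 0)]) =
        ([], ([] ++ [(numbers[numbers.length / 2], 0)]) ++
          ([] ++ numbers.take (numbers.length / 2)).reverse.zip
            (numbers.drop (numbers.length / 2 + 1))) :=
      altPhase2 _ _ _ _ _ _ (by simp [hlen_take]; omega) (by rw [hlen_take]; omega)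
        (by rw [hlen_take]; intro h; omega)
    rw [hA2]
    have hget : PySem.List.pyGet? numbers ((numbers.length / 2 : Nat) : Int) =
        some numbers[numbers.length / 2] := by
      have := PySem.List.pyGet?_eq_some_getElem numbers
        (i := ((numbers.length / 2 : Nat) : Int)) (by omega) (by omega)
      simpa using this
    have h1 : ((numbers.length : Int) / 2 - 1 + 1).toNat = numbers.length / 2 := by omega
    have h2 : ((numbers.length : Int) / 2 + 1).toNat = numbers.length / 2 + 1 := by omega
    rw [hmid] at h1 h2
    rw [h1, h2, hget]
    simp
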